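-- pv_equiv track=rewrite | github.com/adrian-dybwad/DGTCentaurMods | DGTCentaurMods/opt/DGTCentaurMods/games/millennium.py | _odd_parity
-- ===== SOURCE A (Python) =====
-- def _odd_parity(byte_value):
--     """Calculate odd parity for a byte and set MSB if needed.
--
--     Sets MSB only if the byte has even parity (even number of set bits),
--     to make the total parity odd.
--
--     Args:
--         byte_value: Byte value (0-127, ASCII character)
--
--     Returns:
--         Byte value with odd parity bit set in MSB if needed
--     """
--     # Ensure we only work with 7-bit values
--     byte = byte_value & 127
--     # Count set bits in the 7-bit value
--     bit_count = 0
--     temp = byte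
--     while temp:
--         bit_count += temp & 1
--         temp >>= 1
--     # If even number of bits, set parity bit (MSB) to make it odd
--     # If odd number of bits, don't set parity bit (already odd)
--     if bit_count % 2 == 0:
--         return byte_value | 128
--     else:
--         return byte_value & 127
-- ===== SOURCE B (Python) =====
-- def _odd_parity(byte_value):
--     """XOR-fold parity: same result as the bit-counting loop, no loop."""
--     p = byte_value & 127
--     p ^= p >> 4
--     p ^= p >> 2
--     p ^= p >> 1
--     if (p & 1) == 0:
--         return byte_value | 128
--     else:
--         return byte_value & 127
-- ===== Notes on version B (the rewrite author's own statement) =====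
-- stated objective: idiomatic
-- what changed: Replaced the while-loop that counts set bits one at a time with a branch-free XOR shift-fold of the masked seven-bit value, computing the parity without a loop.
import Mathlib
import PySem

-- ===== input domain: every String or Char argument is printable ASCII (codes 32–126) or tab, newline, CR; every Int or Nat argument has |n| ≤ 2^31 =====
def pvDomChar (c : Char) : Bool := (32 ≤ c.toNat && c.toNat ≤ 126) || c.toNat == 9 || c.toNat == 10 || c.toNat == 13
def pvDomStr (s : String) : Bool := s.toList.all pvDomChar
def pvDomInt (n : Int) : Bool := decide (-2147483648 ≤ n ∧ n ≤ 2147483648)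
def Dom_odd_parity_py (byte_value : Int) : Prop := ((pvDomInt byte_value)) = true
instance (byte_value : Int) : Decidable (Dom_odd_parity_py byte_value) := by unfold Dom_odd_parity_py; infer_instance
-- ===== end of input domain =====

-- B replaces A's bit-counting while-loop by a branch-free XOR shift-fold of the masked 7-bit value.

-- ===== PORT A =====
-- Python's `while temp:` loop; the guard `0 < temp` is the totality guard
-- (temp is always the nonnegative masked byte here, where it equals `temp != 0`).
def pvBitLoop (temp cnt : Int) : Int :=
  if _h : 0 < temp then
    pvBitLoop (temp >>> (1:Nat)) (cnt + PySem.Int.band temp 1)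
  else cnt
termination_by temp.toNat
decreasing_by
  rw [Int.shiftRight_eq_div_pow]
  omega

def odd_parity_py (byte_value : Int) : Int :=
  let byte := PySem.Int.band byte_value 127
  let bit_count := pvBitLoop byte 0
  if PySem.Int.mod bit_count 2 = 0 then
    PySem.Int.bor byte_value 128
  else
    PySem.Int.band byte_value 127

-- ===== PORT B =====
def odd_parity_py_alt (byte_value : Int) : Int :=
  let p0 := PySem.Int.band byte_value 127
  let p1 := PySem.Int.bxor p0 (p0 >>> (4:Nat))
  let p2 := PySem.Int.bxor p1 (p1 >>> (2:Nat))
  let p3 := PySem.Int.bxor p2 (p2 >>> (1:Nat))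
  if PySem.Int.band p3 1 = 0 then
    PySem.Int.bor byte_value 128
  else
    PySem.Int.band byte_value 127

-- ===== PRECONDITION & SPEC =====
def Spec_odd_parity_py (byte_value : Int) (out : Int) : Prop := out = odd_parity_py_alt byte_value
instance (byte_value : Int) (out : Int) : Decidable (Spec_odd_parity_py byte_value out) := by unfold Spec_odd_parity_py; infer_instance

-- ===== CLAIM (what is proved, stated in full; the proofs are below) =====
def Claim_equal_odd_parity_py : Prop := ∀ (byte_value : Int), Dom_odd_parity_py byte_value → Spec_odd_parity_py byte_value (odd_parity_py byte_value)

-- ===== LEMMAS AND PROOFS =====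

-- A's loop counts bits: characterisation through PySem.Int.bitCount.
theorem pvBitLoop_eq (k : Nat) : ∀ (temp : Int), 0 ≤ temp → temp.toNat ≤ k → ∀ cnt,
    pvBitLoop temp cnt = cnt + (PySem.Int.bitCount temp : Int) := by
  induction k with
  | zero =>
    intro temp h hk cnt
    have h0 : temp = 0 := by omega
    subst h0
    rw [pvBitLoop]
    simp [PySem.Int.bitCount_zero]
  | succ k ih =>
    intro temp h hk cnt
    rw [pvBitLoop]
    split_ifs with hpos
    · have hdiv : temp >>> (1 : Nat) = PySem.Int.floordiv temp 2 := by
        rw [Int.shiftRight_eq_div_pow, PySem.Int.floordiv_eq_ediv_of_pos (by norm_num)]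
        norm_num
      have hsh : (temp >>> (1 : Nat)) = temp / 2 := by
        rw [Int.shiftRight_eq_div_pow]; norm_num
      rw [ih (temp >>> (1:Nat)) (by omega) (by omega), PySem.Int.band_one, hdiv,
        PySem.Int.bitCount_of_pos hpos]
      have hm0 := PySem.Int.mod_nonneg (a := temp) (b := 2) (by norm_num)
      push_cast [Int.toNat_of_nonneg hm0]
      ring
    · have h0 : temp = 0 := by omega
      subst h0
      simp [PySem.Int.bitCount_zero]

-- the masked value is a Nat below 128
theorem pvBand127_bounds (b : Int) : 0 ≤ PySem.Int.band b 127 ∧ PySem.Int.band b 127 < 128 := by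
  unfold PySem.Int.band
  split_ifs with h1 h2
  · have := Nat.and_le_right (n := b.toNat) (m := (127:Int).toNat)
    constructor <;> omega
  · omega
  · have := Nat.and_le_left (n := (127:Int).toNat) (m := (-b - 1).toNat)
    constructor <;> omega
  · omega

-- the two conditions agree on every seven-bit value (kernel evaluation)
theorem pvParity_cond (n : Nat) (h : n < 128) :
    (PySem.Int.mod (PySem.Int.bitCount (n : Int)) 2 = 0) ↔
    (PySem.Int.band
      (PySem.Int.bxor
        (PySem.Int.bxor (PySem.Int.bxor (n : Int) ((n : Int) >>> (4:Nat)))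
          ((PySem.Int.bxor (n : Int) ((n : Int) >>> (4:Nat))) >>> (2:Nat)))
        ((PySem.Int.bxor (PySem.Int.bxor (n : Int) ((n : Int) >>> (4:Nat)))
          ((PySem.Int.bxor (n : Int) ((n : Int) >>> (4:Nat))) >>> (2:Nat))) >>> (1:Nat))) 1 = 0) := by
  revert h
  revert n
  decide

-- ===== VERDICT (by name: the statement is the Claim_ definition above) =====
theorem odd_parity_py_spec : Claim_equal_odd_parity_py := by
  intro b _
  unfold Spec_odd_parity_py odd_parity_py odd_parity_py_alt
  simp only []
  obtain ⟨h0, h1⟩ := pvBand127_bounds b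
  obtain ⟨n, hn⟩ := Int.eq_ofNat_of_zero_le h0
  have hlt : n < 128 := by omega
  rw [hn, pvBitLoop_eq n (n : Int) (Int.natCast_nonneg n) (by omega) 0, zero_add]
  by_cases hc : PySem.Int.mod (PySem.Int.bitCount (n : Int) : Int) 2 = 0
  · rw [if_pos hc, if_pos ((pvParity_cond n hlt).mp hc)]
  · rw [if_neg hc, if_neg (fun hb => hc ((pvParity_cond n hlt).mpr hb))]
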